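-- pv_equiv track=rewrite | github.com/irisyen115/uva | 11063.py | is_duplicated
-- ===== SOURCE A (Python) =====
-- def is_duplicated(nums):
--     a = []
--     for i in range(len(nums)):
--         for j in range(i,len(nums)):
--             if (nums[i] + nums[j]) in a:
--                 return True
--             a.append(nums[i] + nums[j])
--     return False
-- ===== SOURCE B (Python) =====
-- def is_duplicated(nums):
--     n = len(nums)
--     sums = sorted(nums[i] + nums[j] for i in range(n) for j in range(i, n))
--     for k in range(1, len(sums)):
--         if sums[k - 1] == sums[k]:
--             return True
--     return False
-- ===== Notes on version B (the rewrite author's own statement) =====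
-- stated objective: alternative
-- what changed: Replaces A's incremental generate-and-check membership scan (linear search in a growing list inside the nested loops) with a sort-then-scan: build all pair sums, sort them, and detect a duplicate by comparing adjacent elements only.
import Mathlib
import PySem

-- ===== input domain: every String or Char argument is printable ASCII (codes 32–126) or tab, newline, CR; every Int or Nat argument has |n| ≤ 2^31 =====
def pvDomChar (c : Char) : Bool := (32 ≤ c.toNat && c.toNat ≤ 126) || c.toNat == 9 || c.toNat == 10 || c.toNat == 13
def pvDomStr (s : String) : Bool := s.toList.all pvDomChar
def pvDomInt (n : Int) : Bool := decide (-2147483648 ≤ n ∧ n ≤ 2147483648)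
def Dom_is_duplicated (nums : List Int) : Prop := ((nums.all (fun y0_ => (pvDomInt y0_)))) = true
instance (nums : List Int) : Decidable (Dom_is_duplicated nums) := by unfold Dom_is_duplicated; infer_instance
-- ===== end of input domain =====

-- B sorts all pair sums and detects a duplicate by comparing adjacent elements,
-- instead of A's early-return membership scan against a growing list. Equivalent on all inputs.

-- ===== PORT A =====
-- inner loop 'for j in range(i, len(nums))': some a = fell through (updated list), none = returned True
def isDupJ (nums : List Int) (i : Int) (a : List Int) : List Int → Option (List Int)
  | [] => some a
  | j :: js =>
    let s := PySem.List.pyGetD nums i 0 + PySem.List.pyGetD nums j 0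
    if a.contains s then none
    else isDupJ nums i (a ++ [s]) js

-- outer loop 'for i in range(len(nums))'
def isDupI (nums : List Int) (a : List Int) : List Int → Option (List Int)
  | [] => some a
  | i :: is =>
    match isDupJ nums i a (PySem.List.pyRange i (nums.length : Int) 1) with
    | none => none
    | some a' => isDupI nums a' is

def is_duplicated (nums : List Int) : Bool :=
  (isDupI nums [] (PySem.List.pyRange 0 (nums.length : Int) 1)).isNone

-- ===== PORT B =====
-- 'for k in range(1, len(sums)): if sums[k-1] == sums[k]: return True' as structural recursion on the sorted list
def hasAdjDup : List Int → Bool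
  | x :: y :: t => x == y || hasAdjDup (y :: t)
  | _ => false

def is_duplicated_alt (nums : List Int) : Bool :=
  let n : Int := nums.length
  let sums : List Int :=
    PySem.List.sorted
      ((PySem.List.pyRange 0 n 1).flatMap (fun i =>
        (PySem.List.pyRange i n 1).map (fun j =>
          PySem.List.pyGetD nums i 0 + PySem.List.pyGetD nums j 0)))
      (fun x => x) false
  hasAdjDup sums

-- ===== PRECONDITION & SPEC =====
def Spec_is_duplicated (nums : List Int) (out : Bool) : Prop := out = is_duplicated_alt nums
instance (nums : List Int) (out : Bool) : Decidable (Spec_is_duplicated nums out) := by unfold Spec_is_duplicated; infer_instance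

-- ===== CLAIM =====
def Claim_equal_is_duplicated : Prop := ∀ (nums : List Int), Dom_is_duplicated nums → Spec_is_duplicated nums (is_duplicated nums)

-- ===== LEMMAS AND PROOFS =====

-- A's whole computation as a single scan over the flattened list of pair sums
def pvScan (a : List Int) : List Int → Option (List Int)
  | [] => some a
  | x :: xs => if a.contains x then none else pvScan (a ++ [x]) xs

theorem pvScan_append (L₁ L₂ a : List Int) :
    pvScan a (L₁ ++ L₂) = (pvScan a L₁).bind (fun a' => pvScan a' L₂) := by
  induction L₁ generalizing a with
  | nil => simp [pvScan]
  | cons x xs ih =>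
    simp only [List.cons_append, pvScan]
    split <;> simp [ih]

theorem isDupJ_eq_pvScan (nums : List Int) (i : Int) (a js : List Int) :
    isDupJ nums i a js =
      pvScan a (js.map (fun j => PySem.List.pyGetD nums i 0 + PySem.List.pyGetD nums j 0)) := by
  induction js generalizing a with
  | nil => rfl
  | cons j js ih =>
    simp only [isDupJ, List.map_cons, pvScan]
    split <;> simp [ih]

theorem isDupI_eq_pvScan (nums : List Int) (a is : List Int) :
    isDupI nums a is =
      pvScan a (is.flatMap (fun i =>
        (PySem.List.pyRange i (nums.length : Int) 1).map (fun j =>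
          PySem.List.pyGetD nums i 0 + PySem.List.pyGetD nums j 0))) := by
  induction is generalizing a with
  | nil => rfl
  | cons i is ih =>
    simp only [isDupI, List.flatMap_cons, pvScan_append, isDupJ_eq_pvScan]
    cases pvScan a ((PySem.List.pyRange i (nums.length : Int) 1).map
        (fun j => PySem.List.pyGetD nums i 0 + PySem.List.pyGetD nums j 0)) with
    | none => rfl
    | some a' => simpa using ih a'

-- the scan returns none iff the combined list has a duplicate
theorem pvScan_isNone (L a : List Int) (ha : a.Nodup) :
    (pvScan a L).isNone = !decide ((a ++ L).Nodup) := by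
  induction L generalizing a with
  | nil => simp [pvScan, ha]
  | cons x xs ih =>
    simp only [pvScan]
    by_cases hx : x ∈ a
    · have h : a.contains x = true := by simpa using hx
      have hnd : ¬ (a ++ x :: xs).Nodup := by
        intro hnd
        exact (List.disjoint_of_nodup_append hnd) hx (by simp)
      rw [h]
      simp [hnd]
    · have h : a.contains x = false := by simpa using hx
      have ha' : (a ++ [x]).Nodup := by
        simp [List.nodup_append, ha]
        intro y hy hxy; exact hx (hxy ▸ hy)
      have heq : a ++ x :: xs = (a ++ [x]) ++ xs := by simp
      rw [h]
      simp only [Bool.false_eq_true, if_false, ih _ ha', heq]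

-- a ≤-sorted list has an adjacent duplicate iff it has any duplicate
theorem hasAdjDup_eq (L : List Int) (hL : L.Pairwise (· ≤ ·)) :
    hasAdjDup L = !decide L.Nodup := by
  induction L with
  | nil => simp [hasAdjDup]
  | cons x t ih =>
    cases t with
    | nil => simp [hasAdjDup]
    | cons y s =>
      have hx : ∀ z ∈ y :: s, x ≤ z := by
        intro z hz; exact (List.pairwise_cons.1 hL).1 z hz
      have ht : (y :: s).Pairwise (· ≤ ·) := (List.pairwise_cons.1 hL).2
      by_cases hxy : x = y
      · simp [hasAdjDup, hxy]
      · have hmem : x ∉ y :: s := by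
          intro hm
          rcases List.mem_cons.1 hm with h1 | h2
          · exact hxy h1
          · have hle : x ≤ y := hx y (by simp)
            have hge : y ≤ x := List.rel_of_pairwise_cons ht h2
            exact hxy (le_antisymm hle hge)
        have : (x :: y :: s).Nodup ↔ (y :: s).Nodup := by
          simp [List.nodup_cons, hmem]
        simp [hasAdjDup, hxy, ih ht, this]

-- ===== VERDICT =====
theorem is_duplicated_spec : Claim_equal_is_duplicated := by
  intro nums _
  unfold Spec_is_duplicated is_duplicated is_duplicated_alt
  rw [isDupI_eq_pvScan, pvScan_isNone _ _ List.nodup_nil,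
      hasAdjDup_eq _ (PySem.List.sorted_pairwise _ _)]
  simp only [List.nil_append]
  simp only [List.Perm.nodup_iff (PySem.List.sorted_perm _ _ _)]
  rfl
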